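-- pv_equiv track=rewrite | github.com/sabi-h/qpyr | qpyr/_lib/draw.py | get_alignment_patterns
-- ===== SOURCE A (Python) =====
-- from typing import Callable, Dict, List, Optional, Tuple
--
-- CoordinateValueMap = Dict[Tuple[int, int], int]
--
-- WHITE = 0
--
-- BLACK = 1
--
-- def get_alignment_patterns(positions) -> CoordinateValueMap:
--     result = {}
--     for position in positions:
--         x, y = position
--         xstart, xend = x - 2, x + 2
--         ystart, yend = y - 2, y + 2
--         for i in range(xstart, xend + 1):
--             for j in range(ystart, yend + 1):
--                 if (i == xstart) or (i == xend):
--                     result[i, j] = BLACK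
--                 elif (j == ystart) or (j == yend):
--                     result[i, j] = BLACK
--                 elif (i == x) and (j == y):
--                     result[i, j] = BLACK
--                 else:
--                     result[i, j] = WHITE
--     return result
-- ===== SOURCE B (Python) =====
-- WHITE = 0
--
-- BLACK = 1
--
--
-- def get_alignment_patterns(positions):
--     result = {}
--     for x, y in positions:
--         # stage 1: paint the whole 5x5 square black
--         for i in range(x - 2, x + 3):
--             for j in range(y - 2, y + 3):
--                 result[i, j] = BLACK
--         # stage 2: overwrite the 3x3 interior white
--         for i in range(x - 1, x + 2):
--             for j in range(y - 1, y + 2):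
--                 result[i, j] = WHITE
--         # stage 3: restore the centre module to black
--         result[x, y] = BLACK
--     return result
-- ===== Notes on version B (the rewrite author's own statement) =====
-- stated objective: alternative
-- what changed: B draws each pattern by three staged rectangle fills with overwriting (paint the 5x5 square black, overwrite the 3x3 interior white, restore the centre black) instead of A's per-cell border/centre conditional chain.
import Mathlib
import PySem

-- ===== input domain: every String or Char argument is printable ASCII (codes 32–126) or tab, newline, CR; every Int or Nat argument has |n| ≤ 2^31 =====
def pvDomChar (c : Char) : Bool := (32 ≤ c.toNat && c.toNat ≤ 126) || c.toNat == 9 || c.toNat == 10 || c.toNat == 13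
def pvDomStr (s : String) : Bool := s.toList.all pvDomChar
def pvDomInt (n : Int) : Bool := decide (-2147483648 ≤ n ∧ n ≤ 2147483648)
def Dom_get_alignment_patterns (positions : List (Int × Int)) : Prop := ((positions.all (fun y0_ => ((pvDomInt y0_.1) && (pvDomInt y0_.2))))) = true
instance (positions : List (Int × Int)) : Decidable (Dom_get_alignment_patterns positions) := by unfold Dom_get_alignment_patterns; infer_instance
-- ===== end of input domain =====

-- B draws each alignment pattern by three staged rectangle fills with overwriting
-- (5x5 black, then 3x3 interior white, then the centre black) instead of A's
-- per-cell border/centre conditional chain (objective: alternative).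

-- ===== PORT A =====
def get_alignment_patterns (positions : List (Int × Int)) : List (Int × Int × Int) :=
  let result := positions.foldl (fun result position =>
    let x := position.1
    let y := position.2
    let xstart := x - 2
    let xend := x + 2
    let ystart := y - 2
    let yend := y + 2
    (PySem.List.pyRange xstart (xend + 1) 1).foldl (fun result i =>
      (PySem.List.pyRange ystart (yend + 1) 1).foldl (fun result j =>
        if i = xstart ∨ i = xend then result.insert (i, j) 1
        else if j = ystart ∨ j = yend then result.insert (i, j) 1
        else if i = x ∧ j = y then result.insert (i, j) 1
        else result.insert (i, j) 0) result) result)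
    (PySem.Dict.empty : PySem.Dict (Int × Int) Int)
  result.items.map (fun p => (p.1.1, p.1.2, p.2))

-- ===== PORT B =====
def get_alignment_patterns_alt (positions : List (Int × Int)) : List (Int × Int × Int) :=
  let result := positions.foldl (fun result position =>
    let x := position.1
    let y := position.2
    -- stage 1: paint the whole 5x5 square black
    let r1 := (PySem.List.pyRange (x - 2) (x + 3) 1).foldl (fun r i =>
      (PySem.List.pyRange (y - 2) (y + 3) 1).foldl (fun r j =>
        r.insert (i, j) 1) r) result
    -- stage 2: overwrite the 3x3 interior white
    let r2 := (PySem.List.pyRange (x - 1) (x + 2) 1).foldl (fun r i =>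
      (PySem.List.pyRange (y - 1) (y + 2) 1).foldl (fun r j =>
        r.insert (i, j) 0) r) r1
    -- stage 3: restore the centre module to black
    r2.insert (x, y) 1)
    (PySem.Dict.empty : PySem.Dict (Int × Int) Int)
  result.items.map (fun p => (p.1.1, p.1.2, p.2))

-- ===== PRECONDITION & SPEC =====
def Spec_get_alignment_patterns (positions : List (Int × Int)) (out : List (Int × Int × Int)) : Prop := out = get_alignment_patterns_alt positions
instance (positions : List (Int × Int)) (out : List (Int × Int × Int)) : Decidable (Spec_get_alignment_patterns positions out) := by unfold Spec_get_alignment_patterns; infer_instance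

-- ===== CLAIM (what is proved, stated in full; the proofs are below) =====
def Claim_equal_get_alignment_patterns : Prop := ∀ (positions : List (Int × Int)), Dom_get_alignment_patterns positions → Spec_get_alignment_patterns positions (get_alignment_patterns positions)

-- ===== LEMMAS AND PROOFS =====

-- the per-position insertion sequences of A resp. B, flattened into pair lists
def pvLA (x y : Int) : List ((Int × Int) × Int) :=
  [((x - 2, y - 2), 1),
   ((x - 2, y - 2 + 1), 1),
   ((x - 2, y - 2 + 2), 1),
   ((x - 2, y - 2 + 3), 1),
   ((x - 2, y - 2 + 4), 1),
   ((x - 2 + 1, y - 2), 1),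
   ((x - 2 + 1, y - 2 + 1), 0),
   ((x - 2 + 1, y - 2 + 2), 0),
   ((x - 2 + 1, y - 2 + 3), 0),
   ((x - 2 + 1, y - 2 + 4), 1),
   ((x - 2 + 2, y - 2), 1),
   ((x - 2 + 2, y - 2 + 1), 0),
   ((x - 2 + 2, y - 2 + 2), 1),
   ((x - 2 + 2, y - 2 + 3), 0),
   ((x - 2 + 2, y - 2 + 4), 1),
   ((x - 2 + 3, y - 2), 1),
   ((x - 2 + 3, y - 2 + 1), 0),
   ((x - 2 + 3, y - 2 + 2), 0),
   ((x - 2 + 3, y - 2 + 3), 0),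
   ((x - 2 + 3, y - 2 + 4), 1),
   ((x - 2 + 4, y - 2), 1),
   ((x - 2 + 4, y - 2 + 1), 1),
   ((x - 2 + 4, y - 2 + 2), 1),
   ((x - 2 + 4, y - 2 + 3), 1),
   ((x - 2 + 4, y - 2 + 4), 1)]

def pvLB (x y : Int) : List ((Int × Int) × Int) :=
  [((x - 2, y - 2), 1),
   ((x - 2, y - 2 + 1), 1),
   ((x - 2, y - 2 + 2), 1),
   ((x - 2, y - 2 + 3), 1),
   ((x - 2, y - 2 + 4), 1),
   ((x - 2 + 1, y - 2), 1),
   ((x - 2 + 1, y - 2 + 1), 1),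
   ((x - 2 + 1, y - 2 + 2), 1),
   ((x - 2 + 1, y - 2 + 3), 1),
   ((x - 2 + 1, y - 2 + 4), 1),
   ((x - 2 + 2, y - 2), 1),
   ((x - 2 + 2, y - 2 + 1), 1),
   ((x - 2 + 2, y - 2 + 2), 1),
   ((x - 2 + 2, y - 2 + 3), 1),
   ((x - 2 + 2, y - 2 + 4), 1),
   ((x - 2 + 3, y - 2), 1),
   ((x - 2 + 3, y - 2 + 1), 1),
   ((x - 2 + 3, y - 2 + 2), 1),
   ((x - 2 + 3, y - 2 + 3), 1),
   ((x - 2 + 3, y - 2 + 4), 1),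
   ((x - 2 + 4, y - 2), 1),
   ((x - 2 + 4, y - 2 + 1), 1),
   ((x - 2 + 4, y - 2 + 2), 1),
   ((x - 2 + 4, y - 2 + 3), 1),
   ((x - 2 + 4, y - 2 + 4), 1),
   ((x - 1, y - 1), 0),
   ((x - 1, y - 1 + 1), 0),
   ((x - 1, y - 1 + 2), 0),
   ((x - 1 + 1, y - 1), 0),
   ((x - 1 + 1, y - 1 + 1), 0),
   ((x - 1 + 1, y - 1 + 2), 0),
   ((x - 1 + 2, y - 1), 0),
   ((x - 1 + 2, y - 1 + 1), 0),
   ((x - 1 + 2, y - 1 + 2), 0),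
   ((x, y), 1)]

def pvIns (d : PySem.Dict (Int × Int) Int) (p : (Int × Int) × Int) : PySem.Dict (Int × Int) Int :=
  d.insert p.1 p.2

-- the value A's branch chain assigns to cell (i, j) of the pattern centred at (x, y)
def pvVal (x y i j : Int) : Int :=
  if i = x - 2 ∨ i = x + 2 then 1
  else if j = y - 2 ∨ j = y + 2 then 1
  else if i = x ∧ j = y then 1
  else 0

lemma pvCellA (r : PySem.Dict (Int × Int) Int) (x y i j : Int) :
    (if i = x - 2 ∨ i = x + 2 then r.insert (i, j) 1
     else if j = y - 2 ∨ j = y + 2 then r.insert (i, j) 1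
     else if i = x ∧ j = y then r.insert (i, j) 1
     else r.insert (i, j) 0) = r.insert (i, j) (pvVal x y i j) := by
  unfold pvVal; split_ifs <;> rfl

lemma pvRange5 (a : Int) : PySem.List.pyRange a (a + 5) 1 = [a, a + 1, a + 2, a + 3, a + 4] := by
  rw [PySem.List.pyRange_one_cons (by omega), PySem.List.pyRange_one_cons (by omega),
      PySem.List.pyRange_one_cons (by omega), PySem.List.pyRange_one_cons (by omega),
      PySem.List.pyRange_one_cons (by omega), PySem.List.pyRange_one_eq_nil (by omega)]
  norm_num
  omega

lemma pvRange3 (a : Int) : PySem.List.pyRange a (a + 3) 1 = [a, a + 1, a + 2] := by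
  rw [PySem.List.pyRange_one_cons (by omega), PySem.List.pyRange_one_cons (by omega),
      PySem.List.pyRange_one_cons (by omega), PySem.List.pyRange_one_eq_nil (by omega)]
  norm_num
  omega

set_option maxHeartbeats 1000000 in
lemma pvAstep (d : PySem.Dict (Int × Int) Int) (x y : Int) :
    (PySem.List.pyRange (x - 2) (x + 2 + 1) 1).foldl (fun result i =>
      (PySem.List.pyRange (y - 2) (y + 2 + 1) 1).foldl (fun result j =>
        if i = x - 2 ∨ i = x + 2 then result.insert (i, j) 1
        else if j = y - 2 ∨ j = y + 2 then result.insert (i, j) 1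
        else if i = x ∧ j = y then result.insert (i, j) 1
        else result.insert (i, j) 0) result) d
    = (pvLA x y).foldl pvIns d := by
  have hx : x + 2 + 1 = (x - 2) + 5 := by ring
  have hy : y + 2 + 1 = (y - 2) + 5 := by ring
  have hv00 : pvVal x y (x - 2) (y - 2) = 1 := by unfold pvVal; rw [if_pos (by omega)]
  have hv01 : pvVal x y (x - 2) (y - 2 + 1) = 1 := by unfold pvVal; rw [if_pos (by omega)]
  have hv02 : pvVal x y (x - 2) (y - 2 + 2) = 1 := by unfold pvVal; rw [if_pos (by omega)]
  have hv03 : pvVal x y (x - 2) (y - 2 + 3) = 1 := by unfold pvVal; rw [if_pos (by omega)]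
  have hv04 : pvVal x y (x - 2) (y - 2 + 4) = 1 := by unfold pvVal; rw [if_pos (by omega)]
  have hv10 : pvVal x y (x - 2 + 1) (y - 2) = 1 := by unfold pvVal; rw [if_neg (by omega), if_pos (by omega)]
  have hv11 : pvVal x y (x - 2 + 1) (y - 2 + 1) = 0 := by unfold pvVal; rw [if_neg (by omega), if_neg (by omega), if_neg (by omega)]
  have hv12 : pvVal x y (x - 2 + 1) (y - 2 + 2) = 0 := by unfold pvVal; rw [if_neg (by omega), if_neg (by omega), if_neg (by omega)]
  have hv13 : pvVal x y (x - 2 + 1) (y - 2 + 3) = 0 := by unfold pvVal; rw [if_neg (by omega), if_neg (by omega), if_neg (by omega)]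
  have hv14 : pvVal x y (x - 2 + 1) (y - 2 + 4) = 1 := by unfold pvVal; rw [if_neg (by omega), if_pos (by omega)]
  have hv20 : pvVal x y (x - 2 + 2) (y - 2) = 1 := by unfold pvVal; rw [if_neg (by omega), if_pos (by omega)]
  have hv21 : pvVal x y (x - 2 + 2) (y - 2 + 1) = 0 := by unfold pvVal; rw [if_neg (by omega), if_neg (by omega), if_neg (by omega)]
  have hv22 : pvVal x y (x - 2 + 2) (y - 2 + 2) = 1 := by unfold pvVal; rw [if_neg (by omega), if_neg (by omega), if_pos (by omega)]
  have hv23 : pvVal x y (x - 2 + 2) (y - 2 + 3) = 0 := by unfold pvVal; rw [if_neg (by omega), if_neg (by omega), if_neg (by omega)]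
  have hv24 : pvVal x y (x - 2 + 2) (y - 2 + 4) = 1 := by unfold pvVal; rw [if_neg (by omega), if_pos (by omega)]
  have hv30 : pvVal x y (x - 2 + 3) (y - 2) = 1 := by unfold pvVal; rw [if_neg (by omega), if_pos (by omega)]
  have hv31 : pvVal x y (x - 2 + 3) (y - 2 + 1) = 0 := by unfold pvVal; rw [if_neg (by omega), if_neg (by omega), if_neg (by omega)]
  have hv32 : pvVal x y (x - 2 + 3) (y - 2 + 2) = 0 := by unfold pvVal; rw [if_neg (by omega), if_neg (by omega), if_neg (by omega)]
  have hv33 : pvVal x y (x - 2 + 3) (y - 2 + 3) = 0 := by unfold pvVal; rw [if_neg (by omega), if_neg (by omega), if_neg (by omega)]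
  have hv34 : pvVal x y (x - 2 + 3) (y - 2 + 4) = 1 := by unfold pvVal; rw [if_neg (by omega), if_pos (by omega)]
  have hv40 : pvVal x y (x - 2 + 4) (y - 2) = 1 := by unfold pvVal; rw [if_pos (by omega)]
  have hv41 : pvVal x y (x - 2 + 4) (y - 2 + 1) = 1 := by unfold pvVal; rw [if_pos (by omega)]
  have hv42 : pvVal x y (x - 2 + 4) (y - 2 + 2) = 1 := by unfold pvVal; rw [if_pos (by omega)]
  have hv43 : pvVal x y (x - 2 + 4) (y - 2 + 3) = 1 := by unfold pvVal; rw [if_pos (by omega)]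
  have hv44 : pvVal x y (x - 2 + 4) (y - 2 + 4) = 1 := by unfold pvVal; rw [if_pos (by omega)]
  rw [hx, hy, pvRange5, pvRange5]
  simp only [List.foldl_cons, List.foldl_nil, pvLA, pvIns, pvCellA,
    hv00, hv01, hv02, hv03, hv04, hv10, hv11, hv12, hv13, hv14, hv20, hv21, hv22, hv23, hv24, hv30, hv31, hv32, hv33, hv34, hv40, hv41, hv42, hv43, hv44]

set_option maxHeartbeats 1000000 in
lemma pvBstep (d : PySem.Dict (Int × Int) Int) (x y : Int) :
    ((PySem.List.pyRange (x - 1) (x + 2) 1).foldl (fun r i =>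
      (PySem.List.pyRange (y - 1) (y + 2) 1).foldl (fun r j =>
        r.insert (i, j) 0) r)
      ((PySem.List.pyRange (x - 2) (x + 3) 1).foldl (fun r i =>
        (PySem.List.pyRange (y - 2) (y + 3) 1).foldl (fun r j =>
          r.insert (i, j) 1) r) d)).insert (x, y) 1
    = (pvLB x y).foldl pvIns d := by
  have hx5 : x + 3 = (x - 2) + 5 := by ring
  have hy5 : y + 3 = (y - 2) + 5 := by ring
  have hx3 : x + 2 = (x - 1) + 3 := by ring
  have hy3 : y + 2 = (y - 1) + 3 := by ring
  rw [hx5, hy5, hx3, hy3, pvRange5, pvRange5, pvRange3, pvRange3]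
  simp only [List.foldl_cons, List.foldl_nil, pvLB, pvIns]

-- inserting at a key already present commutes (as dicts, including item order)
-- with an insert at a different key
lemma pvComm (d : PySem.Dict (Int × Int) Int) (k k' : Int × Int) (w v' : Int)
    (hne : k' ≠ k) (hc : d.contains k = true) :
    (d.insert k w).insert k' v' = (d.insert k' v').insert k w := by
  have hbne : (k' == k) = false := by simp [hne]
  have hbne' : (k == k') = false := by simp [Ne.symm hne]
  have hck : (d.insert k' v').contains k = true := by
    rw [PySem.Dict.contains_insert, hc]; simp
  by_cases hck' : d.contains k' = true
  · have h1 : (d.insert k w).contains k' = true := by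
      rw [PySem.Dict.contains_insert, hbne, hck']; rfl
    apply PySem.Dict.ext
    rw [PySem.Dict.items_insert_of_contains _ v' h1,
        PySem.Dict.items_insert_of_contains _ w hc,
        PySem.Dict.items_insert_of_contains _ w hck,
        PySem.Dict.items_insert_of_contains _ v' hck',
        List.map_map, List.map_map]
    apply List.map_congr_left
    intro p _
    simp only [Function.comp]
    by_cases hb1 : (p.1 == k) = true <;> by_cases hb2 : (p.1 == k') = true
    · exact absurd ((eq_of_beq hb2).symm.trans (eq_of_beq hb1)) hne
    · simp [hb1, hb2, hbne']
    · simp [hb1, hb2, hbne]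
    · simp [hb1, hb2]
  · have h1 : (d.insert k w).contains k' = false := by
      rw [PySem.Dict.contains_insert, hbne]; simpa using hck'
    apply PySem.Dict.ext
    rw [PySem.Dict.items_insert_of_not_contains _ v' h1,
        PySem.Dict.items_insert_of_contains _ w hc,
        PySem.Dict.items_insert_of_contains _ w hck,
        PySem.Dict.items_insert_of_not_contains _ v' (by simpa using hck'),
        List.map_append]
    simp [hne]

-- a fold of inserts preserves containment
lemma pvContainsFold (l : List ((Int × Int) × Int)) (d : PySem.Dict (Int × Int) Int)
    (k : Int × Int) (hc : d.contains k = true) :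
    (List.foldl pvIns d l).contains k = true := by
  induction l generalizing d with
  | nil => exact hc
  | cons p l ih =>
    simp only [List.foldl_cons, pvIns]
    exact ih _ (by rw [PySem.Dict.contains_insert, hc]; simp)

-- an insert at a key already present can be pushed to the front of a fold
-- over pairs whose keys all differ from it
lemma pvPush (l : List ((Int × Int) × Int)) (d : PySem.Dict (Int × Int) Int)
    (k : Int × Int) (w : Int) (hl : k ∉ l.map Prod.fst) (hc : d.contains k = true) :
    (List.foldl pvIns d l).insert k w = List.foldl pvIns (d.insert k w) l := by
  induction l generalizing d with
  | nil => rfl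
  | cons p l ih =>
    simp only [List.map_cons, List.mem_cons, not_or] at hl
    simp only [List.foldl_cons, pvIns]
    rw [ih (d.insert p.1 p.2) hl.2 (by rw [PySem.Dict.contains_insert, hc]; simp),
        pvComm d k p.1 w p.2 (fun h => hl.1 h.symm) hc]

-- absorbing a later overwrite of key k into the fill pass that first wrote k
lemma pvAbsorb (d : PySem.Dict (Int × Int) Int) (pre suf q : List ((Int × Int) × Int))
    (k : Int × Int) (v w : Int)
    (hsuf : k ∉ suf.map Prod.fst) (hq : k ∉ q.map Prod.fst) :
    List.foldl pvIns d (pre ++ [(k, v)] ++ suf ++ q ++ [(k, w)])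
      = List.foldl pvIns d (pre ++ [(k, w)] ++ suf ++ q) := by
  simp only [List.foldl_append, List.foldl_cons, List.foldl_nil, pvIns]
  rw [pvPush q _ k w hq
        (pvContainsFold suf _ k (PySem.Dict.contains_insert_self _ k v))]
  congr 1
  rw [pvPush suf _ k w hsuf (PySem.Dict.contains_insert_self _ k v)]
  congr 1
  exact PySem.Dict.insert_insert_self _ k v w

set_option maxHeartbeats 1000000 in
-- the per-position steps agree: A's 25 conditional writes equal B's 35 staged writes
lemma pvStep (d : PySem.Dict (Int × Int) Int) (x y : Int) :
    (pvLA x y).foldl pvIns d = (pvLB x y).foldl pvIns d := by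
  have ex1 : x - 2 + 1 = x - 1 := by ring
  have ex2 : x - 2 + 2 = x := by ring
  have ex3 : x - 2 + 3 = x + 1 := by ring
  have ex4 : x - 2 + 4 = x + 2 := by ring
  have ex5 : x - 1 + 1 = x := by ring
  have ex6 : x - 1 + 2 = x + 1 := by ring
  have ey1 : y - 2 + 1 = y - 1 := by ring
  have ey2 : y - 2 + 2 = y := by ring
  have ey3 : y - 2 + 3 = y + 1 := by ring
  have ey4 : y - 2 + 4 = y + 2 := by ring
  have ey5 : y - 1 + 1 = y := by ring
  have ey6 : y - 1 + 2 = y + 1 := by ring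
  simp only [pvLA, pvLB]
  rw [ex1, ex2, ex3, ex4, ex5, ex6, ey1, ey2, ey3, ey4, ey5, ey6]
  refine Eq.symm ?_
  calc List.foldl pvIns d ([((x - 2, y - 2), 1), ((x - 2, y - 1), 1), ((x - 2, y), 1), ((x - 2, y + 1), 1), ((x - 2, y + 2), 1), ((x - 1, y - 2), 1), ((x - 1, y - 1), 1), ((x - 1, y), 1), ((x - 1, y + 1), 1), ((x - 1, y + 2), 1), ((x, y - 2), 1), ((x, y - 1), 1), ((x, y), 1), ((x, y + 1), 1), ((x, y + 2), 1), ((x + 1, y - 2), 1), ((x + 1, y - 1), 1), ((x + 1, y), 1), ((x + 1, y + 1), 1), ((x + 1, y + 2), 1), ((x + 2, y - 2), 1), ((x + 2, y - 1), 1), ((x + 2, y), 1), ((x + 2, y + 1), 1), ((x + 2, y + 2), 1), ((x - 1, y - 1), 0), ((x - 1, y), 0), ((x - 1, y + 1), 0), ((x, y - 1), 0), ((x, y), 0), ((x, y + 1), 0), ((x + 1, y - 1), 0), ((x + 1, y), 0), ((x + 1, y + 1), 0), ((x, y), 1)])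
      _ = List.foldl pvIns d ([((x - 2, y - 2), 1), ((x - 2, y - 1), 1), ((x - 2, y), 1), ((x - 2, y + 1), 1), ((x - 2, y + 2), 1), ((x - 1, y - 2), 1), ((x - 1, y - 1), 1), ((x - 1, y), 1), ((x - 1, y + 1), 1), ((x - 1, y + 2), 1), ((x, y - 2), 1), ((x, y - 1), 1), ((x, y), 1), ((x, y + 1), 1), ((x, y + 2), 1), ((x + 1, y - 2), 1), ((x + 1, y - 1), 1), ((x + 1, y), 1), ((x + 1, y + 1), 1), ((x + 1, y + 2), 1), ((x + 2, y - 2), 1), ((x + 2, y - 1), 1), ((x + 2, y), 1), ((x + 2, y + 1), 1), ((x + 2, y + 2), 1), ((x - 1, y - 1), 0), ((x - 1, y), 0), ((x - 1, y + 1), 0), ((x, y - 1), 0), ((x, y), 1), ((x, y + 1), 0), ((x + 1, y - 1), 0), ((x + 1, y), 0), ((x + 1, y + 1), 0)]) :=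
        pvAbsorb d [((x - 2, y - 2), 1), ((x - 2, y - 1), 1), ((x - 2, y), 1), ((x - 2, y + 1), 1), ((x - 2, y + 2), 1), ((x - 1, y - 2), 1), ((x - 1, y - 1), 1), ((x - 1, y), 1), ((x - 1, y + 1), 1), ((x - 1, y + 2), 1), ((x, y - 2), 1), ((x, y - 1), 1), ((x, y), 1), ((x, y + 1), 1), ((x, y + 2), 1), ((x + 1, y - 2), 1), ((x + 1, y - 1), 1), ((x + 1, y), 1), ((x + 1, y + 1), 1), ((x + 1, y + 2), 1), ((x + 2, y - 2), 1), ((x + 2, y - 1), 1), ((x + 2, y), 1), ((x + 2, y + 1), 1), ((x + 2, y + 2), 1), ((x - 1, y - 1), 0), ((x - 1, y), 0), ((x - 1, y + 1), 0), ((x, y - 1), 0)] [((x, y + 1), 0), ((x + 1, y - 1), 0), ((x + 1, y), 0), ((x + 1, y + 1), 0)] [] (x, y) 0 1 (by simp only [List.map_cons, List.map_nil, List.mem_cons, List.not_mem_nil, Prod.mk.injEq, or_false]; omega) (by simp)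
      _ = List.foldl pvIns d ([((x - 2, y - 2), 1), ((x - 2, y - 1), 1), ((x - 2, y), 1), ((x - 2, y + 1), 1), ((x - 2, y + 2), 1), ((x - 1, y - 2), 1), ((x - 1, y - 1), 1), ((x - 1, y), 1), ((x - 1, y + 1), 1), ((x - 1, y + 2), 1), ((x, y - 2), 1), ((x, y - 1), 1), ((x, y), 1), ((x, y + 1), 1), ((x, y + 2), 1), ((x + 1, y - 2), 1), ((x + 1, y - 1), 1), ((x + 1, y), 1), ((x + 1, y + 1), 0), ((x + 1, y + 2), 1), ((x + 2, y - 2), 1), ((x + 2, y - 1), 1), ((x + 2, y), 1), ((x + 2, y + 1), 1), ((x + 2, y + 2), 1), ((x - 1, y - 1), 0), ((x - 1, y), 0), ((x - 1, y + 1), 0), ((x, y - 1), 0), ((x, y), 1), ((x, y + 1), 0), ((x + 1, y - 1), 0), ((x + 1, y), 0)]) :=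
        pvAbsorb d [((x - 2, y - 2), 1), ((x - 2, y - 1), 1), ((x - 2, y), 1), ((x - 2, y + 1), 1), ((x - 2, y + 2), 1), ((x - 1, y - 2), 1), ((x - 1, y - 1), 1), ((x - 1, y), 1), ((x - 1, y + 1), 1), ((x - 1, y + 2), 1), ((x, y - 2), 1), ((x, y - 1), 1), ((x, y), 1), ((x, y + 1), 1), ((x, y + 2), 1), ((x + 1, y - 2), 1), ((x + 1, y - 1), 1), ((x + 1, y), 1)] [((x + 1, y + 2), 1), ((x + 2, y - 2), 1), ((x + 2, y - 1), 1), ((x + 2, y), 1), ((x + 2, y + 1), 1), ((x + 2, y + 2), 1)] [((x - 1, y - 1), 0), ((x - 1, y), 0), ((x - 1, y + 1), 0), ((x, y - 1), 0), ((x, y), 1), ((x, y + 1), 0), ((x + 1, y - 1), 0), ((x + 1, y), 0)] (x + 1, y + 1) 1 0 (by simp only [List.map_cons, List.map_nil, List.mem_cons, List.not_mem_nil, Prod.mk.injEq, or_false]; omega) (by simp only [List.map_cons, List.map_nil, List.mem_cons, List.not_mem_nil, Prod.mk.injEq, or_false]; omega)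
      _ = List.foldl pvIns d ([((x - 2, y - 2), 1), ((x - 2, y - 1), 1), ((x - 2, y), 1), ((x - 2, y + 1), 1), ((x - 2, y + 2), 1), ((x - 1, y - 2), 1), ((x - 1, y - 1), 1), ((x - 1, y), 1), ((x - 1, y + 1), 1), ((x - 1, y + 2), 1), ((x, y - 2), 1), ((x, y - 1), 1), ((x, y), 1), ((x, y + 1), 1), ((x, y + 2), 1), ((x + 1, y - 2), 1), ((x + 1, y - 1), 1), ((x + 1, y), 0), ((x + 1, y + 1), 0), ((x + 1, y + 2), 1), ((x + 2, y - 2), 1), ((x + 2, y - 1), 1), ((x + 2, y), 1), ((x + 2, y + 1), 1), ((x + 2, y + 2), 1), ((x - 1, y - 1), 0), ((x - 1, y), 0), ((x - 1, y + 1), 0), ((x, y - 1), 0), ((x, y), 1), ((x, y + 1), 0), ((x + 1, y - 1), 0)]) :=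
        pvAbsorb d [((x - 2, y - 2), 1), ((x - 2, y - 1), 1), ((x - 2, y), 1), ((x - 2, y + 1), 1), ((x - 2, y + 2), 1), ((x - 1, y - 2), 1), ((x - 1, y - 1), 1), ((x - 1, y), 1), ((x - 1, y + 1), 1), ((x - 1, y + 2), 1), ((x, y - 2), 1), ((x, y - 1), 1), ((x, y), 1), ((x, y + 1), 1), ((x, y + 2), 1), ((x + 1, y - 2), 1), ((x + 1, y - 1), 1)] [((x + 1, y + 1), 0), ((x + 1, y + 2), 1), ((x + 2, y - 2), 1), ((x + 2, y - 1), 1), ((x + 2, y), 1), ((x + 2, y + 1), 1), ((x + 2, y + 2), 1)] [((x - 1, y - 1), 0), ((x - 1, y), 0), ((x - 1, y + 1), 0), ((x, y - 1), 0), ((x, y), 1), ((x, y + 1), 0), ((x + 1, y - 1), 0)] (x + 1, y) 1 0 (by simp only [List.map_cons, List.map_nil, List.mem_cons, List.not_mem_nil, Prod.mk.injEq, or_false]; omega) (by simp only [List.map_cons, List.map_nil, List.mem_cons, List.not_mem_nil, Prod.mk.injEq, or_false]; omega)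
      _ = List.foldl pvIns d ([((x - 2, y - 2), 1), ((x - 2, y - 1), 1), ((x - 2, y), 1), ((x - 2, y + 1), 1), ((x - 2, y + 2), 1), ((x - 1, y - 2), 1), ((x - 1, y - 1), 1), ((x - 1, y), 1), ((x - 1, y + 1), 1), ((x - 1, y + 2), 1), ((x, y - 2), 1), ((x, y - 1), 1), ((x, y), 1), ((x, y + 1), 1), ((x, y + 2), 1), ((x + 1, y - 2), 1), ((x + 1, y - 1), 0), ((x + 1, y), 0), ((x + 1, y + 1), 0), ((x + 1, y + 2), 1), ((x + 2, y - 2), 1), ((x + 2, y - 1), 1), ((x + 2, y), 1), ((x + 2, y + 1), 1), ((x + 2, y + 2), 1), ((x - 1, y - 1), 0), ((x - 1, y), 0), ((x - 1, y + 1), 0), ((x, y - 1), 0), ((x, y), 1), ((x, y + 1), 0)]) :=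
        pvAbsorb d [((x - 2, y - 2), 1), ((x - 2, y - 1), 1), ((x - 2, y), 1), ((x - 2, y + 1), 1), ((x - 2, y + 2), 1), ((x - 1, y - 2), 1), ((x - 1, y - 1), 1), ((x - 1, y), 1), ((x - 1, y + 1), 1), ((x - 1, y + 2), 1), ((x, y - 2), 1), ((x, y - 1), 1), ((x, y), 1), ((x, y + 1), 1), ((x, y + 2), 1), ((x + 1, y - 2), 1)] [((x + 1, y), 0), ((x + 1, y + 1), 0), ((x + 1, y + 2), 1), ((x + 2, y - 2), 1), ((x + 2, y - 1), 1), ((x + 2, y), 1), ((x + 2, y + 1), 1), ((x + 2, y + 2), 1)] [((x - 1, y - 1), 0), ((x - 1, y), 0), ((x - 1, y + 1), 0), ((x, y - 1), 0), ((x, y), 1), ((x, y + 1), 0)] (x + 1, y - 1) 1 0 (by simp only [List.map_cons, List.map_nil, List.mem_cons, List.not_mem_nil, Prod.mk.injEq, or_false]; omega) (by simp only [List.map_cons, List.map_nil, List.mem_cons, List.not_mem_nil, Prod.mk.injEq, or_false]; omega)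
      _ = List.foldl pvIns d ([((x - 2, y - 2), 1), ((x - 2, y - 1), 1), ((x - 2, y), 1), ((x - 2, y + 1), 1), ((x - 2, y + 2), 1), ((x - 1, y - 2), 1), ((x - 1, y - 1), 1), ((x - 1, y), 1), ((x - 1, y + 1), 1), ((x - 1, y + 2), 1), ((x, y - 2), 1), ((x, y - 1), 1), ((x, y), 1), ((x, y + 1), 0), ((x, y + 2), 1), ((x + 1, y - 2), 1), ((x + 1, y - 1), 0), ((x + 1, y), 0), ((x + 1, y + 1), 0), ((x + 1, y + 2), 1), ((x + 2, y - 2), 1), ((x + 2, y - 1), 1), ((x + 2, y), 1), ((x + 2, y + 1), 1), ((x + 2, y + 2), 1), ((x - 1, y - 1), 0), ((x - 1, y), 0), ((x - 1, y + 1), 0), ((x, y - 1), 0), ((x, y), 1)]) :=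
        pvAbsorb d [((x - 2, y - 2), 1), ((x - 2, y - 1), 1), ((x - 2, y), 1), ((x - 2, y + 1), 1), ((x - 2, y + 2), 1), ((x - 1, y - 2), 1), ((x - 1, y - 1), 1), ((x - 1, y), 1), ((x - 1, y + 1), 1), ((x - 1, y + 2), 1), ((x, y - 2), 1), ((x, y - 1), 1), ((x, y), 1)] [((x, y + 2), 1), ((x + 1, y - 2), 1), ((x + 1, y - 1), 0), ((x + 1, y), 0), ((x + 1, y + 1), 0), ((x + 1, y + 2), 1), ((x + 2, y - 2), 1), ((x + 2, y - 1), 1), ((x + 2, y), 1), ((x + 2, y + 1), 1), ((x + 2, y + 2), 1)] [((x - 1, y - 1), 0), ((x - 1, y), 0), ((x - 1, y + 1), 0), ((x, y - 1), 0), ((x, y), 1)] (x, y + 1) 1 0 (by simp only [List.map_cons, List.map_nil, List.mem_cons, List.not_mem_nil, Prod.mk.injEq, or_false]; omega) (by simp only [List.map_cons, List.map_nil, List.mem_cons, List.not_mem_nil, Prod.mk.injEq, or_false]; omega)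
      _ = List.foldl pvIns d ([((x - 2, y - 2), 1), ((x - 2, y - 1), 1), ((x - 2, y), 1), ((x - 2, y + 1), 1), ((x - 2, y + 2), 1), ((x - 1, y - 2), 1), ((x - 1, y - 1), 1), ((x - 1, y), 1), ((x - 1, y + 1), 1), ((x - 1, y + 2), 1), ((x, y - 2), 1), ((x, y - 1), 1), ((x, y), 1), ((x, y + 1), 0), ((x, y + 2), 1), ((x + 1, y - 2), 1), ((x + 1, y - 1), 0), ((x + 1, y), 0), ((x + 1, y + 1), 0), ((x + 1, y + 2), 1), ((x + 2, y - 2), 1), ((x + 2, y - 1), 1), ((x + 2, y), 1), ((x + 2, y + 1), 1), ((x + 2, y + 2), 1), ((x - 1, y - 1), 0), ((x - 1, y), 0), ((x - 1, y + 1), 0), ((x, y - 1), 0)]) :=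
        pvAbsorb d [((x - 2, y - 2), 1), ((x - 2, y - 1), 1), ((x - 2, y), 1), ((x - 2, y + 1), 1), ((x - 2, y + 2), 1), ((x - 1, y - 2), 1), ((x - 1, y - 1), 1), ((x - 1, y), 1), ((x - 1, y + 1), 1), ((x - 1, y + 2), 1), ((x, y - 2), 1), ((x, y - 1), 1)] [((x, y + 1), 0), ((x, y + 2), 1), ((x + 1, y - 2), 1), ((x + 1, y - 1), 0), ((x + 1, y), 0), ((x + 1, y + 1), 0), ((x + 1, y + 2), 1), ((x + 2, y - 2), 1), ((x + 2, y - 1), 1), ((x + 2, y), 1), ((x + 2, y + 1), 1), ((x + 2, y + 2), 1)] [((x - 1, y - 1), 0), ((x - 1, y), 0), ((x - 1, y + 1), 0), ((x, y - 1), 0)] (x, y) 1 1 (by simp only [List.map_cons, List.map_nil, List.mem_cons, List.not_mem_nil, Prod.mk.injEq, or_false]; omega) (by simp only [List.map_cons, List.map_nil, List.mem_cons, List.not_mem_nil, Prod.mk.injEq, or_false]; omega)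
      _ = List.foldl pvIns d ([((x - 2, y - 2), 1), ((x - 2, y - 1), 1), ((x - 2, y), 1), ((x - 2, y + 1), 1), ((x - 2, y + 2), 1), ((x - 1, y - 2), 1), ((x - 1, y - 1), 1), ((x - 1, y), 1), ((x - 1, y + 1), 1), ((x - 1, y + 2), 1), ((x, y - 2), 1), ((x, y - 1), 0), ((x, y), 1), ((x, y + 1), 0), ((x, y + 2), 1), ((x + 1, y - 2), 1), ((x + 1, y - 1), 0), ((x + 1, y), 0), ((x + 1, y + 1), 0), ((x + 1, y + 2), 1), ((x + 2, y - 2), 1), ((x + 2, y - 1), 1), ((x + 2, y), 1), ((x + 2, y + 1), 1), ((x + 2, y + 2), 1), ((x - 1, y - 1), 0), ((x - 1, y), 0), ((x - 1, y + 1), 0)]) :=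
        pvAbsorb d [((x - 2, y - 2), 1), ((x - 2, y - 1), 1), ((x - 2, y), 1), ((x - 2, y + 1), 1), ((x - 2, y + 2), 1), ((x - 1, y - 2), 1), ((x - 1, y - 1), 1), ((x - 1, y), 1), ((x - 1, y + 1), 1), ((x - 1, y + 2), 1), ((x, y - 2), 1)] [((x, y), 1), ((x, y + 1), 0), ((x, y + 2), 1), ((x + 1, y - 2), 1), ((x + 1, y - 1), 0), ((x + 1, y), 0), ((x + 1, y + 1), 0), ((x + 1, y + 2), 1), ((x + 2, y - 2), 1), ((x + 2, y - 1), 1), ((x + 2, y), 1), ((x + 2, y + 1), 1), ((x + 2, y + 2), 1)] [((x - 1, y - 1), 0), ((x - 1, y), 0), ((x - 1, y + 1), 0)] (x, y - 1) 1 0 (by simp only [List.map_cons, List.map_nil, List.mem_cons, List.not_mem_nil, Prod.mk.injEq, or_false]; omega) (by simp only [List.map_cons, List.map_nil, List.mem_cons, List.not_mem_nil, Prod.mk.injEq, or_false]; omega)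
      _ = List.foldl pvIns d ([((x - 2, y - 2), 1), ((x - 2, y - 1), 1), ((x - 2, y), 1), ((x - 2, y + 1), 1), ((x - 2, y + 2), 1), ((x - 1, y - 2), 1), ((x - 1, y - 1), 1), ((x - 1, y), 1), ((x - 1, y + 1), 0), ((x - 1, y + 2), 1), ((x, y - 2), 1), ((x, y - 1), 0), ((x, y), 1), ((x, y + 1), 0), ((x, y + 2), 1), ((x + 1, y - 2), 1), ((x + 1, y - 1), 0), ((x + 1, y), 0), ((x + 1, y + 1), 0), ((x + 1, y + 2), 1), ((x + 2, y - 2), 1), ((x + 2, y - 1), 1), ((x + 2, y), 1), ((x + 2, y + 1), 1), ((x + 2, y + 2), 1), ((x - 1, y - 1), 0), ((x - 1, y), 0)]) :=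
        pvAbsorb d [((x - 2, y - 2), 1), ((x - 2, y - 1), 1), ((x - 2, y), 1), ((x - 2, y + 1), 1), ((x - 2, y + 2), 1), ((x - 1, y - 2), 1), ((x - 1, y - 1), 1), ((x - 1, y), 1)] [((x - 1, y + 2), 1), ((x, y - 2), 1), ((x, y - 1), 0), ((x, y), 1), ((x, y + 1), 0), ((x, y + 2), 1), ((x + 1, y - 2), 1), ((x + 1, y - 1), 0), ((x + 1, y), 0), ((x + 1, y + 1), 0), ((x + 1, y + 2), 1), ((x + 2, y - 2), 1), ((x + 2, y - 1), 1), ((x + 2, y), 1), ((x + 2, y + 1), 1), ((x + 2, y + 2), 1)] [((x - 1, y - 1), 0), ((x - 1, y), 0)] (x - 1, y + 1) 1 0 (by simp only [List.map_cons, List.map_nil, List.mem_cons, List.not_mem_nil, Prod.mk.injEq, or_false]; omega) (by simp only [List.map_cons, List.map_nil, List.mem_cons, List.not_mem_nil, Prod.mk.injEq, or_false]; omega)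
      _ = List.foldl pvIns d ([((x - 2, y - 2), 1), ((x - 2, y - 1), 1), ((x - 2, y), 1), ((x - 2, y + 1), 1), ((x - 2, y + 2), 1), ((x - 1, y - 2), 1), ((x - 1, y - 1), 1), ((x - 1, y), 0), ((x - 1, y + 1), 0), ((x - 1, y + 2), 1), ((x, y - 2), 1), ((x, y - 1), 0), ((x, y), 1), ((x, y + 1), 0), ((x, y + 2), 1), ((x + 1, y - 2), 1), ((x + 1, y - 1), 0), ((x + 1, y), 0), ((x + 1, y + 1), 0), ((x + 1, y + 2), 1), ((x + 2, y - 2), 1), ((x + 2, y - 1), 1), ((x + 2, y), 1), ((x + 2, y + 1), 1), ((x + 2, y + 2), 1), ((x - 1, y - 1), 0)]) :=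
        pvAbsorb d [((x - 2, y - 2), 1), ((x - 2, y - 1), 1), ((x - 2, y), 1), ((x - 2, y + 1), 1), ((x - 2, y + 2), 1), ((x - 1, y - 2), 1), ((x - 1, y - 1), 1)] [((x - 1, y + 1), 0), ((x - 1, y + 2), 1), ((x, y - 2), 1), ((x, y - 1), 0), ((x, y), 1), ((x, y + 1), 0), ((x, y + 2), 1), ((x + 1, y - 2), 1), ((x + 1, y - 1), 0), ((x + 1, y), 0), ((x + 1, y + 1), 0), ((x + 1, y + 2), 1), ((x + 2, y - 2), 1), ((x + 2, y - 1), 1), ((x + 2, y), 1), ((x + 2, y + 1), 1), ((x + 2, y + 2), 1)] [((x - 1, y - 1), 0)] (x - 1, y) 1 0 (by simp only [List.map_cons, List.map_nil, List.mem_cons, List.not_mem_nil, Prod.mk.injEq, or_false]; omega) (by simp only [List.map_cons, List.map_nil, List.mem_cons, List.not_mem_nil, Prod.mk.injEq, or_false]; omega)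
      _ = List.foldl pvIns d ([((x - 2, y - 2), 1), ((x - 2, y - 1), 1), ((x - 2, y), 1), ((x - 2, y + 1), 1), ((x - 2, y + 2), 1), ((x - 1, y - 2), 1), ((x - 1, y - 1), 0), ((x - 1, y), 0), ((x - 1, y + 1), 0), ((x - 1, y + 2), 1), ((x, y - 2), 1), ((x, y - 1), 0), ((x, y), 1), ((x, y + 1), 0), ((x, y + 2), 1), ((x + 1, y - 2), 1), ((x + 1, y - 1), 0), ((x + 1, y), 0), ((x + 1, y + 1), 0), ((x + 1, y + 2), 1), ((x + 2, y - 2), 1), ((x + 2, y - 1), 1), ((x + 2, y), 1), ((x + 2, y + 1), 1), ((x + 2, y + 2), 1)]) :=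
        pvAbsorb d [((x - 2, y - 2), 1), ((x - 2, y - 1), 1), ((x - 2, y), 1), ((x - 2, y + 1), 1), ((x - 2, y + 2), 1), ((x - 1, y - 2), 1)] [((x - 1, y), 0), ((x - 1, y + 1), 0), ((x - 1, y + 2), 1), ((x, y - 2), 1), ((x, y - 1), 0), ((x, y), 1), ((x, y + 1), 0), ((x, y + 2), 1), ((x + 1, y - 2), 1), ((x + 1, y - 1), 0), ((x + 1, y), 0), ((x + 1, y + 1), 0), ((x + 1, y + 2), 1), ((x + 2, y - 2), 1), ((x + 2, y - 1), 1), ((x + 2, y), 1), ((x + 2, y + 1), 1), ((x + 2, y + 2), 1)] [] (x - 1, y - 1) 1 0 (by simp only [List.map_cons, List.map_nil, List.mem_cons, List.not_mem_nil, Prod.mk.injEq, or_false]; omega) (by simp)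

-- folding both step functions over the position list gives the same dict
lemma pvOuter (ps : List (Int × Int)) (d : PySem.Dict (Int × Int) Int) :
    ps.foldl (fun result position =>
      let x := position.1
      let y := position.2
      let xstart := x - 2
      let xend := x + 2
      let ystart := y - 2
      let yend := y + 2
      (PySem.List.pyRange xstart (xend + 1) 1).foldl (fun result i =>
        (PySem.List.pyRange ystart (yend + 1) 1).foldl (fun result j =>
          if i = xstart ∨ i = xend then result.insert (i, j) 1
          else if j = ystart ∨ j = yend then result.insert (i, j) 1
          else if i = x ∧ j = y then result.insert (i, j) 1
          else result.insert (i, j) 0) result) result) d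
    = ps.foldl (fun result position =>
      let x := position.1
      let y := position.2
      let r1 := (PySem.List.pyRange (x - 2) (x + 3) 1).foldl (fun r i =>
        (PySem.List.pyRange (y - 2) (y + 3) 1).foldl (fun r j =>
          r.insert (i, j) 1) r) result
      let r2 := (PySem.List.pyRange (x - 1) (x + 2) 1).foldl (fun r i =>
        (PySem.List.pyRange (y - 1) (y + 2) 1).foldl (fun r j =>
          r.insert (i, j) 0) r) r1
      r2.insert (x, y) 1) d := by
  induction ps generalizing d with
  | nil => rfl
  | cons p ps ih =>
    obtain ⟨x, y⟩ := p
    simp only [List.foldl_cons]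
    rw [pvAstep, pvBstep, pvStep]
    exact ih _

-- ===== VERDICT (by name: the statement is the Claim_ definition above) =====
theorem get_alignment_patterns_spec : Claim_equal_get_alignment_patterns := by
  intro positions _
  unfold Spec_get_alignment_patterns
  simp only [get_alignment_patterns, get_alignment_patterns_alt]
  rw [pvOuter]
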